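-- pv_equiv track=rewrite | github.com/qqqzhch/ai-pdf-agent | plugins/converters/epub_converter.py | _group_pages_by_chapter
-- ===== SOURCE A (Python) =====
-- from typing import Dict, List, Optional, Any, Tuple
--
-- def _group_pages_by_chapter(pages: List[int], chapter_pages: int) -> List[List[int]]:
--     """
--     按章节分组页面
--
--     Args:
--         pages: 页码列表
--         chapter_pages: 每章页数（0=每页一章）
--
--     Returns:
--         List[List[int]]: 章节列表
--     """
--     if chapter_pages <= 0:
--         # 每页一章
--         return [[p] for p in pages]
--     else:
--         # 按指定页数分组
--         groups = []
--         for i in range(0, len(pages), chapter_pages):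
--             groups.append(pages[i:i + chapter_pages])
--         return groups
-- ===== SOURCE B (Python) =====
-- from typing import List
--
-- def _group_pages_by_chapter(pages: List[int], chapter_pages: int) -> List[List[int]]:
--     """Single pass over pages with an accumulator instead of stride-based slicing."""
--     size = chapter_pages if chapter_pages > 0 else 1
--     groups: List[List[int]] = []
--     current: List[int] = []
--     for p in pages:
--         current.append(p)
--         if len(current) == size:
--             groups.append(current)
--             current = []
--     if current:
--         groups.append(current)
--     return groups
-- ===== Notes on version B (the rewrite author's own statement) =====
-- stated objective: alternative
-- what changed: Replaces the two branches (a list-of-singletons comprehension and a stride-indexed slicing loop) by one single pass over the pages with an accumulator sublist that is flushed whenever it reaches the effective chunk size.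
import Mathlib
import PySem

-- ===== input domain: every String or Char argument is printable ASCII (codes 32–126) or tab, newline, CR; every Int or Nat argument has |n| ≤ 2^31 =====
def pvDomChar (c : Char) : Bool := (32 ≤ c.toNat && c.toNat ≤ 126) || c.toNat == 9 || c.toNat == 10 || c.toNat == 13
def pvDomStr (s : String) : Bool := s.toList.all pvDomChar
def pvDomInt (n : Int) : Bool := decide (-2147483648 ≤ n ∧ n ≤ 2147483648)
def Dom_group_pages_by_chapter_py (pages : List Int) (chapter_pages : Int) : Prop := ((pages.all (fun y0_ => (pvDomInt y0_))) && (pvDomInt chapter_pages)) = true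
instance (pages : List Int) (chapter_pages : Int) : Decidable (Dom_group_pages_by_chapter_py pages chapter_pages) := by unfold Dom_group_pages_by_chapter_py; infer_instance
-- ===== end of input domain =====

-- B replaces A's two branches (singleton comprehension / stride-slicing loop) by one
-- accumulator pass over the pages with a unified effective chunk size (objective: alternative).

-- ===== PORT A =====
def group_pages_by_chapter_py (pages : List Int) (chapter_pages : Int) : List (List Int) :=
  if chapter_pages ≤ 0 then
    pages.map (fun p => [p])
  else
    (PySem.List.pyRange 0 (pages.length : Int) chapter_pages).foldl
      (fun groups i => groups ++ [PySem.List.slice pages (some i) (some (i + chapter_pages))]) []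

-- ===== PORT B =====
-- one loop iteration of B: append p to current; flush current into groups when it reaches size
def altStep (size : Int) (s : List (List Int) × List Int) (p : Int) : List (List Int) × List Int :=
  let current := s.2 ++ [p]
  if (current.length : Int) = size then (s.1 ++ [current], []) else (s.1, current)

def group_pages_by_chapter_py_alt (pages : List Int) (chapter_pages : Int) : List (List Int) :=
  let size := if chapter_pages > 0 then chapter_pages else 1
  let st := pages.foldl (altStep size) ([], [])
  if st.2.isEmpty then st.1 else st.1 ++ [st.2]

-- ===== PRECONDITION & SPEC =====
def Spec_group_pages_by_chapter_py (pages : List Int) (chapter_pages : Int) (out : List (List Int)) : Prop := out = group_pages_by_chapter_py_alt pages chapter_pages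
instance (pages : List Int) (chapter_pages : Int) (out : List (List Int)) : Decidable (Spec_group_pages_by_chapter_py pages chapter_pages out) := by unfold Spec_group_pages_by_chapter_py; infer_instance

-- ===== CLAIM (what is proved, stated in full; the proofs are below) =====
def Claim_equal_group_pages_by_chapter_py : Prop := ∀ (pages : List Int) (chapter_pages : Int), Dom_group_pages_by_chapter_py pages chapter_pages → Spec_group_pages_by_chapter_py pages chapter_pages (group_pages_by_chapter_py pages chapter_pages)

-- ===== LEMMAS AND PROOFS =====

-- common specification: split a list into chunks of n (last one possibly shorter)
def pvChunk (n : Nat) : List Int → List (List Int)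
  | [] => []
  | x :: xs => (x :: xs.take (n-1)) :: pvChunk n (xs.drop (n-1))
termination_by xs => xs.length
decreasing_by simp only [List.length_drop, List.length_cons]; omega

theorem pvChunk_cons (n : Nat) (hn : 1 ≤ n) (ys : List Int) (hys : ys ≠ []) :
    pvChunk n ys = ys.take n :: pvChunk n (ys.drop n) := by
  cases ys with
  | nil => exact absurd rfl hys
  | cons y t =>
      rw [pvChunk]
      obtain ⟨m, rfl⟩ : ∃ m, n = m + 1 := ⟨n - 1, by omega⟩
      simp

theorem pvChunk_append (n : Nat) (hn : 1 ≤ n) (ys zs : List Int) (hlen : ys.length = n) :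
    pvChunk n (ys ++ zs) = ys :: pvChunk n zs := by
  have hys : ys ≠ [] := by intro h; subst h; simp at hlen; omega
  rw [pvChunk_cons n hn (ys ++ zs) (by simp [hys])]
  rw [List.take_append_of_le_length (by omega), List.take_of_length_le (by omega),
      List.drop_append_of_le_length (by omega), List.drop_of_length_le (by omega)]
  simp

theorem pvChunk_small (n : Nat) (ys : List Int) (hys : ys ≠ []) (hlen : ys.length ≤ n) :
    pvChunk n ys = [ys] := by
  rw [pvChunk_cons n (by
    cases ys with
    | nil => exact absurd rfl hys
    | cons a t => simp at hlen; omega) ys hys]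
  rw [List.take_of_length_le hlen, List.drop_of_length_le hlen, pvChunk]

theorem pvChunk_one (xs : List Int) : pvChunk 1 xs = xs.map (fun p => [p]) := by
  induction xs with
  | nil => rw [pvChunk]; rfl
  | cons x xs ih => rw [pvChunk]; simpa using ih

-- B's loop computes pvChunk
theorem alt_loop (s : Int) (hs : 1 ≤ s) :
    ∀ (xs : List Int) (g : List (List Int)) (cur : List Int), (cur.length : Int) < s →
      (if (xs.foldl (altStep s) (g, cur)).2.isEmpty then (xs.foldl (altStep s) (g, cur)).1
       else (xs.foldl (altStep s) (g, cur)).1 ++ [(xs.foldl (altStep s) (g, cur)).2])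
      = g ++ pvChunk s.toNat (cur ++ xs) := by
  intro xs
  induction xs with
  | nil =>
      intro g cur hcur
      simp only [List.foldl_nil, List.append_nil]
      cases h : cur.isEmpty with
      | true =>
          have : cur = [] := by simpa [List.isEmpty_iff] using h
          subst this; simp [pvChunk]
      | false =>
          have hne : cur ≠ [] := by simpa [List.isEmpty_iff] using h
          rw [pvChunk_small _ _ hne (by omega)]
          simp
  | cons p rest ih =>
      intro g cur hcur
      simp only [List.foldl_cons]
      by_cases hlen : ((cur ++ [p]).length : Int) = s
      · have hlen' : (cur.length : Int) + 1 = s := by simpa using hlen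
        have hstep : altStep s (g, cur) p = (g ++ [cur ++ [p]], []) := by
          simp [altStep, hlen']
        rw [hstep, ih (g ++ [cur ++ [p]]) [] (by simp only [List.length_nil, Int.natCast_zero]; omega)]
        have hl : (cur ++ [p]).length = s.toNat := by
          simp only [List.length_append, List.length_cons, List.length_nil] at hlen ⊢
          omega
        rw [show cur ++ p :: rest = (cur ++ [p]) ++ rest from by simp,
            pvChunk_append s.toNat (by omega) _ rest hl]
        simp
      · have hlen' : ¬ ((cur.length : Int) + 1 = s) := by simpa using hlen
        have hstep : altStep s (g, cur) p = (g, cur ++ [p]) := by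
          simp [altStep, hlen']
        have hc : ((cur ++ [p]).length : Int) < s := by
          simp only [List.length_append, List.length_cons, List.length_nil] at hlen ⊢
          push_cast at hlen ⊢
          omega
        rw [hstep, ih g (cur ++ [p]) hc]
        simp

-- pyRange with a positive step: nil and cons forms
theorem pyRange_pos_nil (a b s : Int) (hs : 0 < s) (h : b ≤ a) :
    PySem.List.pyRange a b s = [] := by
  rw [PySem.List.pyRange_of_pos a b hs, if_neg (by omega)]
  simp

theorem pyRange_pos_cons (a b s : Int) (hs : 0 < s) (h : a < b) :
    PySem.List.pyRange a b s = a :: PySem.List.pyRange (a + s) b s := by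
  rw [PySem.List.pyRange_of_pos a b hs, PySem.List.pyRange_of_pos (a + s) b hs, if_pos h]
  by_cases h2 : a + s < b
  · rw [if_pos h2]
    have hnum : b - a + s - 1 = (b - (a + s) + s - 1) + 1 * s := by ring
    have hdiv : (b - a + s - 1) / s = (b - (a + s) + s - 1) / s + 1 := by
      rw [hnum, Int.add_mul_ediv_right _ _ (by omega)]
    have hpos : 0 ≤ (b - (a + s) + s - 1) / s := Int.ediv_nonneg (by omega) (by omega)
    have htn : ((b - a + s - 1) / s).toNat = ((b - (a + s) + s - 1) / s).toNat + 1 := by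
      omega
    rw [htn, List.range_succ_eq_map]
    simp only [List.map_cons, List.map_map]
    congr 1
    · simp
    · apply List.map_congr_left
      intro k _
      simp only [Function.comp_apply]
      push_cast
      ring
  · rw [if_neg (by omega)]
    have h1 : s ≤ b - a + s - 1 := by omega
    have h2' : b - a + s - 1 < 2 * s := by omega
    have hdiv : (b - a + s - 1) / s = 1 := by
      have hle : 1 ≤ (b - a + s - 1) / s := Int.le_ediv_iff_mul_le (by omega) |>.mpr (by omega)
      have hlt : (b - a + s - 1) / s < 2 := Int.ediv_lt_iff_lt_mul (by omega) |>.mpr (by omega)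
      omega
    rw [hdiv]
    simp

-- A's slicing loop computes pvChunk
theorem a_loop (pages : List Int) (cp : Int) (hcp : 0 < cp) :
    ∀ (fuel : Nat) (k : Int) (acc : List (List Int)), 0 ≤ k →
      (pages.length : Int) - k ≤ fuel →
      (PySem.List.pyRange k (pages.length : Int) cp).foldl
        (fun groups i => groups ++ [PySem.List.slice pages (some i) (some (i + cp))]) acc
      = acc ++ pvChunk cp.toNat (pages.drop k.toNat) := by
  intro fuel
  induction fuel with
  | zero =>
      intro k acc hk hfuel
      rw [pyRange_pos_nil _ _ _ hcp (by omega)]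
      rw [List.drop_of_length_le (by omega), pvChunk]
      simp
  | succ fuel ih =>
      intro k acc hk hfuel
      by_cases hkb : k < (pages.length : Int)
      · rw [pyRange_pos_cons _ _ _ hcp hkb, List.foldl_cons]
        rw [ih (k + cp) _ (by omega) (by omega)]
        have hslice : PySem.List.slice pages (some k) (some (k + cp))
            = (pages.drop k.toNat).take cp.toNat := by
          rw [PySem.List.slice_toNat pages hk (by omega)]
          congr 1
          omega
        have hdrop : pages.drop (k + cp).toNat = (pages.drop k.toNat).drop cp.toNat := by
          rw [List.drop_drop]
          congr 1
          omega
        have hne : pages.drop k.toNat ≠ [] := by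
          intro h
          have := congrArg List.length h
          simp at this
          omega
        rw [hslice, hdrop, pvChunk_cons cp.toNat (by omega) (pages.drop k.toNat) hne]
        simp
      · rw [pyRange_pos_nil _ _ _ hcp (by omega)]
        rw [List.drop_of_length_le (by omega), pvChunk]
        simp

-- ===== VERDICT (by name: the statement is the Claim_ definition above) =====
theorem group_pages_by_chapter_py_spec : Claim_equal_group_pages_by_chapter_py := by
  intro pages chapter_pages _
  unfold Spec_group_pages_by_chapter_py group_pages_by_chapter_py group_pages_by_chapter_py_alt
  by_cases hcp : chapter_pages ≤ 0
  · rw [if_pos hcp]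
    have hsize : (if chapter_pages > 0 then chapter_pages else 1) = 1 := by
      rw [if_neg (by omega)]
    simp only [hsize]
    rw [alt_loop 1 le_rfl pages [] [] (by simp)]
    simp [pvChunk_one]
  · rw [if_neg hcp]
    have hsize : (if chapter_pages > 0 then chapter_pages else 1) = chapter_pages := by
      rw [if_pos (by omega)]
    simp only [hsize]
    rw [a_loop pages chapter_pages (by omega) pages.length 0 [] le_rfl (by simp),
        alt_loop chapter_pages (by omega) pages [] []
          (by simp only [List.length_nil, Int.natCast_zero]; omega)]
    simp
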